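-- pv_equiv track=rewrite | github.com/Sachin-kumar-m/DSA-Practice | interview Problems/specialIndex.py | specialIndex
-- ===== SOURCE A (Python) =====
-- def specialIndex(A):
--     oddSum = [0]*len(A)
--     evenSum = [0]*len(A)
--
--     oddSum[0] = 0
--     evenSum[0] =A[0]
--     for i in range(1,len(A)):
--         if i%2==0:
--             evenSum[i] = evenSum[i-1]+A[i]
--             oddSum[i] = oddSum[i-1]
--         else:
--             evenSum[i] = evenSum[i-1]
--             oddSum[i] = oddSum[i-1]+A[i]
--     ans = 0
--     for i in range(len(A)):
--         odd = 0
--         even = 0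
--         if i==0:
--             odd = oddSum[len(A)-1]
--             even = evenSum[len(A)-1] - evenSum[0]
--         else:
--             odd = oddSum[i-1]+(evenSum[len(A)-1]-evenSum[i])
--             even = even[i-1]+(odd[len(A)-1]-odd[i])
--         if odd == even:
--             ans+=1
--         return ans
-- ===== SOURCE B (Python) =====
-- def specialIndex(A):
--     # A's `return ans` sits inside the loop, so only the i == 0 iteration runs:
--     # the result is 1 iff the sum at odd indices equals the sum at even indices > 0.
--     odd = even = 0
--     for i, x in enumerate(A):
--         if i % 2 == 1:
--             odd += x
--         elif i > 0:
--             even += x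
--     return 1 if odd == even else 0
-- ===== Notes on version B (the rewrite author's own statement) =====
-- stated objective: simpler
-- what changed: A (which always returns during the first iteration of its second loop because `return` is indented inside it) builds two length-n prefix-sum arrays and then reads only their endpoints; B is a single pass accumulating the odd-index sum and the even-index-after-0 sum directly, with no arrays.
import Mathlib
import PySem

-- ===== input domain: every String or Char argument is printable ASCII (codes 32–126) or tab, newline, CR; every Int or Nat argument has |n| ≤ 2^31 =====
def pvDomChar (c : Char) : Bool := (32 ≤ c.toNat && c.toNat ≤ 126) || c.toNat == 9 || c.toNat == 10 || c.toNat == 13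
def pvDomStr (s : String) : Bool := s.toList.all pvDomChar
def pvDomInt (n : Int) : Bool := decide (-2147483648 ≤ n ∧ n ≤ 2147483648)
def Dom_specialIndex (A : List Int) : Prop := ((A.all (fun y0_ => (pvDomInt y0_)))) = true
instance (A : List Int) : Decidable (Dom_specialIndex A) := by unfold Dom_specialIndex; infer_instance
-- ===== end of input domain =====

-- B replaces A's prefix-sum arrays (whose second Python loop returns during its first
-- iteration, `return` being indented inside it) by one pass over enumerate(A) accumulating
-- the two sums directly: simpler, no arrays; same return value on every nonempty input.


-- ===== PORT A =====
-- the body of A's first `for` loop (updates the two prefix-sum arrays at index i)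
def aStep (A : List Int) (st : List Int × List Int) (i : Int) : List Int × List Int :=
  if PySem.Int.mod i 2 == 0 then
    (PySem.List.pySetD st.1 i (PySem.List.pyGetD st.1 (i-1) 0),
     PySem.List.pySetD st.2 i (PySem.List.pyGetD st.2 (i-1) 0 + PySem.List.pyGetD A i 0))
  else
    (PySem.List.pySetD st.1 i (PySem.List.pyGetD st.1 (i-1) 0 + PySem.List.pyGetD A i 0),
     PySem.List.pySetD st.2 i (PySem.List.pyGetD st.2 (i-1) 0))

def specialIndex (A : List Int) : Int :=
  let n : Int := (A.length : Int)
  let oddSum : List Int := List.replicate A.length 0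
  let evenSum : List Int := List.replicate A.length 0
  let oddSum := PySem.List.pySetD oddSum 0 0
  let evenSum := PySem.List.pySetD evenSum 0 (PySem.List.pyGetD A 0 0)
  let st := (PySem.List.pyRange 1 n 1).foldl (aStep A) (oddSum, evenSum)
  let ans : Int := 0
  match PySem.List.pyRange 0 n 1 with
  | [] => ans
  | i :: _ =>
    if i == 0 then
      let odd := PySem.List.pyGetD st.1 (n - 1) 0
      let even := PySem.List.pyGetD st.2 (n - 1) 0 - PySem.List.pyGetD st.2 0 0
      if odd == even then ans + 1 else ans
    else ans

-- ===== PORT B =====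
def specialIndex_alt (A : List Int) : Int :=
  let st := (PySem.List.enumerate A 0).foldl
    (fun (st : Int × Int) (p : Int × Int) =>
      if PySem.Int.mod p.1 2 == 1 then (st.1 + p.2, st.2)
      else if 0 < p.1 then (st.1, st.2 + p.2) else st)
    ((0 : Int), (0 : Int))
  if st.1 == st.2 then 1 else 0

-- ===== PRECONDITION & SPEC =====
-- Pre_ excludes exactly the empty list, on which A raises IndexError (`oddSum[0] = 0`).
def Pre_specialIndex (A : List Int) : Prop := A ≠ []
instance (A : List Int) : Decidable (Pre_specialIndex A) := by unfold Pre_specialIndex; infer_instance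
def pvWitness_specialIndex : List Int := ([1, 2, 3])

def Spec_specialIndex (A : List Int) (out : Int) : Prop := out = specialIndex_alt A
instance (A : List Int) (out : Int) : Decidable (Spec_specialIndex A out) := by unfold Spec_specialIndex; infer_instance

-- ===== CLAIM (what is proved, stated in full; the proofs are below) =====
def Claim_equal_specialIndex : Prop := ∀ (A : List Int), Dom_specialIndex A → Pre_specialIndex A → Spec_specialIndex A (specialIndex A)

-- ===== LEMMAS AND PROOFS =====

-- sum of the elements of l at offsets j with (s + j) odd
def oddAcc : List Int → Int → Int
  | [], _ => 0
  | x :: t, s => (if PySem.Int.mod s 2 == 1 then x else 0) + oddAcc t (s + 1)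

-- sum of the elements of l at offsets j with (s + j) even
def evenAcc : List Int → Int → Int
  | [], _ => 0
  | x :: t, s => (if PySem.Int.mod s 2 == 0 then x else 0) + evenAcc t (s + 1)

-- sum of the elements of l at offsets j with (s + j) even and positive (B's `elif i > 0` sum)
def evenAccP : List Int → Int → Int
  | [], _ => 0
  | x :: t, s => (if PySem.Int.mod s 2 == 0 && decide (0 < s) then x else 0) + evenAccP t (s + 1)

-- the initial state of A's first loop (after `oddSum[0] = 0; evenSum[0] = A[0]`)
def aInit (A : List Int) : List Int × List Int :=
  (PySem.List.pySetD (List.replicate A.length (0:Int)) 0 0,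
   PySem.List.pySetD (List.replicate A.length (0:Int)) 0 (PySem.List.pyGetD A 0 0))

theorem evenAccP_eq_evenAcc (l : List Int) : ∀ s : Int, 0 < s → evenAccP l s = evenAcc l s := by
  induction l with
  | nil => intro s _; rfl
  | cons x t ih =>
    intro s hs
    simp only [evenAccP, evenAcc, decide_eq_true hs, Bool.and_true, ih (s + 1) (by omega)]

theorem alt_fold (l : List Int) : ∀ (s o e : Int),
    (PySem.List.enumerate l s).foldl
      (fun (st : Int × Int) (p : Int × Int) =>
        if PySem.Int.mod p.1 2 == 1 then (st.1 + p.2, st.2)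
        else if 0 < p.1 then (st.1, st.2 + p.2) else st)
      (o, e) = (o + oddAcc l s, e + evenAccP l s) := by
  induction l with
  | nil => intro s o e; simp [PySem.List.enumerate_nil, oddAcc, evenAccP]
  | cons x t ih =>
    intro s o e
    rw [PySem.List.enumerate_cons, List.foldl_cons]
    cases h1 : (PySem.Int.mod s 2 == 1) with
    | true =>
      have hm : PySem.Int.mod s 2 = 1 := eq_of_beq h1
      have h0 : (PySem.Int.mod s 2 == 0) = false := by rw [hm]; decide
      simp only [oddAcc, evenAccP, h1, h0, Bool.false_and, if_true, if_false, ih,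
        Prod.mk.injEq, Bool.false_eq_true]
      constructor <;> ring
    | false =>
      have h1' : PySem.Int.mod s 2 ≠ 1 := ne_of_beq_false h1
      have hm : PySem.Int.mod s 2 = 0 := by
        have ha := PySem.Int.mod_nonneg (a := s) (b := 2) (by omega)
        have hb := PySem.Int.mod_lt (a := s) (b := 2) (by omega)
        omega
      have h0 : (PySem.Int.mod s 2 == 0) = true := by rw [hm]; decide
      cases h2 : decide ((0:Int) < s) with
      | true =>
        have hs : (0:Int) < s := of_decide_eq_true h2
        simp only [oddAcc, evenAccP, h1, h0, h2, Bool.true_and, if_true, if_false, if_pos hs, ih,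
          Prod.mk.injEq, Bool.false_eq_true]
        constructor <;> ring
      | false =>
        have hs : ¬ (0:Int) < s := of_decide_eq_false h2
        simp only [oddAcc, evenAccP, h1, h0, h2, Bool.and_false, if_false, if_neg hs, ih,
          Prod.mk.injEq, Bool.false_eq_true]
        constructor <;> ring

theorem oddAcc_append (x : Int) (l : List Int) : ∀ s : Int,
    oddAcc (l ++ [x]) s = oddAcc l s + (if PySem.Int.mod (s + l.length) 2 == 1 then x else 0) := by
  induction l with
  | nil => intro s; simp [oddAcc]
  | cons y t ih =>
    intro s
    simp only [List.cons_append, oddAcc, ih (s + 1), List.length_cons]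
    have : s + 1 + (t.length : Int) = s + ((t.length : Int) + 1) := by ring
    rw [this]
    push_cast
    ring

theorem evenAcc_append (x : Int) (l : List Int) : ∀ s : Int,
    evenAcc (l ++ [x]) s = evenAcc l s + (if PySem.Int.mod (s + l.length) 2 == 0 then x else 0) := by
  induction l with
  | nil => intro s; simp [evenAcc]
  | cons y t ih =>
    intro s
    simp only [List.cons_append, evenAcc, ih (s + 1), List.length_cons]
    have : s + 1 + (t.length : Int) = s + ((t.length : Int) + 1) := by ring
    rw [this]
    push_cast
    ring

theorem aLoop_invariant (a : Int) (t : List Int) (k : Nat) (hk : k < (a :: t).length) :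
    ((PySem.List.pyRange 1 ((k : Int) + 1) 1).foldl (aStep (a :: t)) (aInit (a :: t))).1.length = (a :: t).length ∧
    ((PySem.List.pyRange 1 ((k : Int) + 1) 1).foldl (aStep (a :: t)) (aInit (a :: t))).2.length = (a :: t).length ∧
    PySem.List.pyGetD ((PySem.List.pyRange 1 ((k : Int) + 1) 1).foldl (aStep (a :: t)) (aInit (a :: t))).1 (k : Int) 0
      = oddAcc ((a :: t).take (k+1)) 0 ∧
    PySem.List.pyGetD ((PySem.List.pyRange 1 ((k : Int) + 1) 1).foldl (aStep (a :: t)) (aInit (a :: t))).2 (k : Int) 0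
      = evenAcc ((a :: t).take (k+1)) 0 ∧
    PySem.List.pyGetD ((PySem.List.pyRange 1 ((k : Int) + 1) 1).foldl (aStep (a :: t)) (aInit (a :: t))).2 0 0 = a := by
  induction k with
  | zero =>
    rw [show ((0:Nat):Int) + 1 = 1 by norm_num, PySem.List.pyRange_one_eq_nil (by omega)]
    simp only [List.foldl_nil, aInit]
    simp [PySem.List.pySetD_of_nonneg, PySem.List.pyGetD_zero_cons, List.replicate_succ,
      oddAcc, evenAcc, PySem.Int.mod]
  | succ k ih =>
    have hk' : k < (a :: t).length := by omega
    obtain ⟨hlen1, hlen2, hodd, heven, hzero⟩ := ih hk'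
    have hb : (1:Int) ≤ (k:Int) + 1 := by omega
    rw [show ((k+1:Nat):Int) + 1 = ((k:Int)+1) + 1 by push_cast; ring,
        PySem.List.pyRange_one_succ_right hb, List.foldl_append, List.foldl_cons, List.foldl_nil]
    set st := (PySem.List.pyRange 1 ((k : Int) + 1) 1).foldl (aStep (a :: t)) (aInit (a :: t)) with hst
    have hidx : ((k:Int) + 1) = ((k+1 : Nat) : Int) := by push_cast; ring
    have hklen : k + 1 < (a :: t).length := hk
    have htake : (a :: t).take (k+1+1) = (a :: t).take (k+1) ++ [(a :: t)[k+1]] := by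
      rw [List.take_add_one, List.getElem?_eq_getElem hklen]
      simp
    have hlentakeN : ((a :: t).take (k+1)).length = k+1 := by
      have h' : k + 1 < t.length + 1 := by simpa using hk
      rw [List.length_take, List.length_cons]; omega
    have hlentake : (((a :: t).take (k+1)).length : Int) = ((k+1 : Nat) : Int) := by rw [hlentakeN]
    have hgetA : PySem.List.pyGetD (a :: t) ((k+1:Nat):Int) 0 = (a :: t)[k+1] := by
      rw [PySem.List.pyGetD_natCast, List.getD_eq_getElem?_getD, List.getElem?_eq_getElem hklen]
      rfl
    have hsub : ((k:Int) + 1) - 1 = (k : Int) := by ring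
    by_cases hpar : (k+1) % 2 = 0
    · have hcond : (PySem.Int.mod ((k:Int)+1) 2 == 0) = true := by
        rw [PySem.Int.mod_eq_emod_of_pos (by omega)]
        simp only [beq_iff_eq]; omega
      simp only [aStep, hcond, if_true, hsub]
      constructor
      · rw [PySem.List.length_pySetD]; exact hlen1
      constructor
      · rw [PySem.List.length_pySetD]; exact hlen2
      constructor
      · rw [hidx, PySem.List.pyGetD_pySetD_natCast _ _ _ _ _ (by rw [hlen1]; exact hklen)]
        rw [if_pos rfl, htake, oddAcc_append, hodd, hlentake]
        have : (PySem.Int.mod (0 + ((k+1:Nat):Int)) 2 == 1) = false := by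
          rw [zero_add, PySem.Int.mod_eq_emod_of_pos (by omega)]
          simp only [beq_eq_false_iff_ne, ne_eq]; omega
        rw [this]; simp
      constructor
      · rw [hidx, PySem.List.pyGetD_pySetD_natCast _ _ _ _ _ (by rw [hlen2]; exact hklen)]
        rw [if_pos rfl, htake, evenAcc_append, heven, hlentake, hgetA]
        have : (PySem.Int.mod (0 + ((k+1:Nat):Int)) 2 == 0) = true := by
          rw [zero_add, PySem.Int.mod_eq_emod_of_pos (by omega)]
          simp only [beq_iff_eq]; omega
        rw [this, if_pos rfl]
      · rw [hidx, show ((0:Int) = ((0:Nat):Int)) by norm_num,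
           PySem.List.pyGetD_pySetD_natCast _ _ _ _ _ (by rw [hlen2]; exact hklen)]
        rw [if_neg (by omega : ¬ (0 = k + 1))]
        exact hzero
    · have hcond : (PySem.Int.mod ((k:Int)+1) 2 == 0) = false := by
        rw [PySem.Int.mod_eq_emod_of_pos (by omega)]
        simp only [beq_eq_false_iff_ne, ne_eq]; omega
      simp only [aStep, hcond, if_false, hsub, Bool.false_eq_true]
      constructor
      · rw [PySem.List.length_pySetD]; exact hlen1
      constructor
      · rw [PySem.List.length_pySetD]; exact hlen2
      constructor
      · rw [hidx, PySem.List.pyGetD_pySetD_natCast _ _ _ _ _ (by rw [hlen1]; exact hklen)]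
        rw [if_pos rfl, htake, oddAcc_append, hodd, hlentake, hgetA]
        have : (PySem.Int.mod (0 + ((k+1:Nat):Int)) 2 == 1) = true := by
          rw [zero_add, PySem.Int.mod_eq_emod_of_pos (by omega)]
          simp only [beq_iff_eq]; omega
        rw [this, if_pos rfl]
      constructor
      · rw [hidx, PySem.List.pyGetD_pySetD_natCast _ _ _ _ _ (by rw [hlen2]; exact hklen)]
        rw [if_pos rfl, htake, evenAcc_append, heven, hlentake]
        have : (PySem.Int.mod (0 + ((k+1:Nat):Int)) 2 == 0) = false := by
          rw [zero_add, PySem.Int.mod_eq_emod_of_pos (by omega)]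
          simp only [beq_eq_false_iff_ne, ne_eq]; omega
        rw [this]; simp
      · rw [hidx, show ((0:Int) = ((0:Nat):Int)) by norm_num,
           PySem.List.pyGetD_pySetD_natCast _ _ _ _ _ (by rw [hlen2]; exact hklen)]
        rw [if_neg (by omega : ¬ (0 = k + 1))]
        exact hzero

theorem specialIndex_eq (a : Int) (t : List Int) :
    specialIndex (a :: t) =
      (if (oddAcc (a :: t) 0 == evenAcc (a :: t) 0 - a) then (1:Int) else 0) := by
  have hlen : ((a :: t).length : Int) = ((t.length : Int) + 1) := by simp
  have hk : t.length < (a :: t).length := by simp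
  obtain ⟨h1, h2, hodd, heven, hzero⟩ := aLoop_invariant a t t.length hk
  have hrange0 : PySem.List.pyRange 0 ((a :: t).length : Int) 1
      = 0 :: PySem.List.pyRange 1 ((a :: t).length : Int) 1 := by
    exact PySem.List.pyRange_one_cons (by simp)
  have htk : (a :: t).take (t.length + 1) = a :: t := by
    apply List.take_of_length_le; simp
  simp only [aInit] at hodd heven hzero
  rw [htk] at hodd heven
  have hn1 : ((a :: t).length : Int) - 1 = (t.length : Int) := by rw [hlen]; ring
  simp only [specialIndex, hrange0]
  rw [if_pos (show ((0:Int) == 0) = true from rfl), hn1, hlen, hodd, heven, hzero]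
  split_ifs <;> simp

theorem alt_eq (A : List Int) :
    specialIndex_alt A = (if (oddAcc A 0 == evenAccP A 0) then (1:Int) else 0) := by
  have h := alt_fold A 0 0 0
  simp only [specialIndex_alt, h, zero_add]

-- ===== VERDICT (by name: the statement is the Claim_ definition above) =====
theorem specialIndex_spec : Claim_equal_specialIndex := by
  intro A _ hPre
  unfold Spec_specialIndex
  cases A with
  | nil => exact absurd rfl hPre
  | cons a t =>
    rw [specialIndex_eq a t, alt_eq]
    have hbridge : evenAcc (a :: t) 0 - a = evenAccP (a :: t) 0 := by
      simp [evenAcc, evenAccP, evenAccP_eq_evenAcc t 1 (by omega)]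
    rw [hbridge]
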